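-- pv_equiv track=rewrite | github.com/amorphia78/llmproc | src/llm_activism_article_multitool.py | split_string_at_midpoint
-- ===== SOURCE A (Python) =====
-- def split_string_at_midpoint(input_string):
--     lines = input_string.splitlines()
--     total_length = sum(len(line) for line in lines)
--     halfway_point = total_length // 2
--     current_length = 0
--     split_index = 0
--     for i, line in enumerate(lines):
--         current_length += len(line)
--         if current_length >= halfway_point:
--             split_index = i
--             break
--     first_part = '\n'.join(lines[:split_index + 1])
--     second_part = '\n'.join(lines[split_index + 1:])
--     return first_part, second_part
-- ===== SOURCE B (Python) =====
-- def split_string_at_midpoint(input_string):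
--     lines = input_string.splitlines()
--     prefix = []
--     running = 0
--     for line in lines:
--         running += len(line)
--         prefix.append(running)
--     half = running // 2
--     # binary search: least index whose cumulative length reaches half
--     lo, hi = 0, len(prefix)
--     while lo < hi:
--         mid = (lo + hi) // 2
--         if prefix[mid] >= half:
--             hi = mid
--         else:
--             lo = mid + 1
--     first_part = '\n'.join(lines[:lo + 1])
--     second_part = '\n'.join(lines[lo + 1:])
--     return first_part, second_part
-- ===== Notes on version B (the rewrite author's own statement) =====
-- stated objective: alternative
-- what changed: Replaces A's single accumulating for-loop with break by a prefix-sum array built once plus a binary search for the least index whose cumulative length reaches half the total.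
import Mathlib
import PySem

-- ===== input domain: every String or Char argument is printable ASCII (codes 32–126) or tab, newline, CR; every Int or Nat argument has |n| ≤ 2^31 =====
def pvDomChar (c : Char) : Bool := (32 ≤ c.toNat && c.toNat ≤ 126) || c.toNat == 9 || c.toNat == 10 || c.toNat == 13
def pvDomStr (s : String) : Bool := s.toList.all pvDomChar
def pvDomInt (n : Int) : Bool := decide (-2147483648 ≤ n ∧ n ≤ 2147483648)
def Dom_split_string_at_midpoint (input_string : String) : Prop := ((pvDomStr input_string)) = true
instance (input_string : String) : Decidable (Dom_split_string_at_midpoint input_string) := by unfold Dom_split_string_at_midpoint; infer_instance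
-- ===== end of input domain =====

-- B replaces A's accumulating scan-with-break by a prefix-sum array plus a binary search (alternative decomposition, same O(n) cost).

-- ===== PORT A =====
-- the for-loop with break: first index whose running length reaches halfway, else the initial split_index
def pvALoop (halfway : Int) : List (Int × String) → Int → Int → Int
  | [], _cur, si => si
  | (i, line) :: rest, cur, si =>
    let cur' := cur + PySem.Str.len line
    if halfway ≤ cur' then i else pvALoop halfway rest cur' si

def split_string_at_midpoint (input_string : String) : String × String :=
  let lines := PySem.Str.splitlines input_string
  let total_length := lines.foldl (fun acc line => acc + PySem.Str.len line) 0
  let halfway_point := PySem.Int.floordiv total_length 2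
  let split_index := pvALoop halfway_point (PySem.List.enumerate lines 0) 0 0
  (PySem.Str.join "\n" (PySem.List.slice lines none (some (split_index + 1))),
   PySem.Str.join "\n" (PySem.List.slice lines (some (split_index + 1)) none))

-- ===== PORT B =====
-- Source B's while-loop binary search; pre[mid] is always in range, getD's default is never read
def pvBSearch (pre : List Int) (half : Int) (lo hi : Nat) : Nat :=
  if _h : lo < hi then
    let mid := (lo + hi) / 2
    if half ≤ pre.getD mid 0 then pvBSearch pre half lo mid
    else pvBSearch pre half (mid + 1) hi
  else lo
termination_by hi - lo
decreasing_by all_goals omega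

def split_string_at_midpoint_alt (input_string : String) : String × String :=
  let lines := PySem.Str.splitlines input_string
  let pr := lines.foldl (fun (acc : List Int × Int) line =>
      let r := acc.2 + PySem.Str.len line
      (acc.1 ++ [r], r)) ([], 0)
  let half := PySem.Int.floordiv pr.2 2
  let lo := pvBSearch pr.1 half 0 pr.1.length
  (PySem.Str.join "\n" (PySem.List.slice lines none (some ((lo : Int) + 1))),
   PySem.Str.join "\n" (PySem.List.slice lines (some ((lo : Int) + 1)) none))

-- ===== PRECONDITION & SPEC =====
def Spec_split_string_at_midpoint (input_string : String) (out : String × String) : Prop := out = split_string_at_midpoint_alt input_string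
instance (input_string : String) (out : String × String) : Decidable (Spec_split_string_at_midpoint input_string out) := by unfold Spec_split_string_at_midpoint; infer_instance

-- ===== CLAIM (what is proved, stated in full; the proofs are below) =====
def Claim_equal_split_string_at_midpoint : Prop := ∀ (input_string : String), Dom_split_string_at_midpoint input_string → Spec_split_string_at_midpoint input_string (split_string_at_midpoint input_string)

-- ===== LEMMAS AND PROOFS =====

-- reference prefix sums and running total, used only in the proofs
def pvPsums (r : Int) : List String → List Int
  | [] => []
  | l :: ls => (r + PySem.Str.len l) :: pvPsums (r + PySem.Str.len l) ls

def pvSumL : List String → Int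
  | [] => 0
  | l :: ls => PySem.Str.len l + pvSumL ls

theorem pvLen_nonneg (s : String) : 0 ≤ PySem.Str.len s := by
  simp [PySem.Str.len_eq]

theorem pvSumL_nonneg (ls : List String) : 0 ≤ pvSumL ls := by
  induction ls with
  | nil => simp [pvSumL]
  | cons l ls ih => have := pvLen_nonneg l; rw [pvSumL]; omega

theorem pvFoldl_sum (ls : List String) : ∀ c : Int,
    ls.foldl (fun acc line => acc + PySem.Str.len line) c = c + pvSumL ls := by
  induction ls with
  | nil => intro c; simp [pvSumL]
  | cons l ls ih =>
    intro c
    rw [List.foldl_cons, ih (c + PySem.Str.len l), pvSumL]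
    ring

theorem pvFoldl_pr (ls : List String) : ∀ (acc : List Int) (r : Int),
    ls.foldl (fun (a : List Int × Int) line =>
      let r' := a.2 + PySem.Str.len line
      (a.1 ++ [r'], r')) (acc, r) = (acc ++ pvPsums r ls, r + pvSumL ls) := by
  induction ls with
  | nil => intro acc r; simp [pvPsums, pvSumL]
  | cons l ls ih =>
    intro acc r
    rw [List.foldl_cons]
    show ls.foldl _ (acc ++ [r + PySem.Str.len l], r + PySem.Str.len l) = _
    rw [ih (acc ++ [r + PySem.Str.len l]) (r + PySem.Str.len l)]
    rw [show pvPsums r (l :: ls) = (r + PySem.Str.len l) :: pvPsums (r + PySem.Str.len l) ls from rfl]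
    rw [show pvSumL (l :: ls) = PySem.Str.len l + pvSumL ls from rfl]
    simp only [Prod.mk.injEq]
    exact ⟨by simp, by ring⟩

theorem pvPsums_length (r : Int) (ls : List String) : (pvPsums r ls).length = ls.length := by
  induction ls generalizing r with
  | nil => simp [pvPsums]
  | cons l ls ih => rw [pvPsums, List.length_cons, List.length_cons, ih]

theorem pvPsums_mem_le (r : Int) (ls : List String) : ∀ x ∈ pvPsums r ls, r ≤ x := by
  induction ls generalizing r with
  | nil => simp [pvPsums]
  | cons l ls ih =>
    intro x hx
    have hl := pvLen_nonneg l
    rw [pvPsums, List.mem_cons] at hx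
    rcases hx with h | h
    · omega
    · have := ih (r + PySem.Str.len l) x h; omega

theorem pvPsums_pairwise (r : Int) (ls : List String) : (pvPsums r ls).Pairwise (· ≤ ·) := by
  induction ls generalizing r with
  | nil => simp [pvPsums]
  | cons l ls ih =>
    rw [pvPsums, List.pairwise_cons]
    exact ⟨fun x hx => pvPsums_mem_le _ _ x hx, ih _⟩

theorem pvPsums_mono (r : Int) (ls : List String) {i j : Nat} (hij : i ≤ j)
    (hj : j < (pvPsums r ls).length) :
    (pvPsums r ls)[i]'(Nat.lt_of_le_of_lt hij hj) ≤ (pvPsums r ls)[j] := by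
  rcases Nat.lt_or_ge i j with h | h
  · exact (List.pairwise_iff_getElem.mp (pvPsums_pairwise r ls)) i j (by omega) hj h
  · have : i = j := by omega
    subst this; exact le_refl _

-- the running total is one of the prefix sums when the list is nonempty
theorem pvTotal_mem (r : Int) (ls : List String) (h : ls ≠ []) :
    r + pvSumL ls ∈ pvPsums r ls := by
  induction ls generalizing r with
  | nil => simp at h
  | cons l ls ih =>
    cases ls with
    | nil => simp [pvPsums, pvSumL]
    | cons a as =>
      rw [pvPsums, pvSumL, List.mem_cons]
      right
      rw [show r + (PySem.Str.len l + pvSumL (a :: as)) = r + PySem.Str.len l + pvSumL (a :: as) by ring]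
      exact ih _ (by simp)

-- findIdx ≤ any true index
theorem pvFindIdx_le {p : Int → Bool} {l : List Int} {i : Nat} (hi : i < l.length)
    (hp : p (l[i]'hi) = true) : l.findIdx p ≤ i := by
  by_contra h
  have hfalse : p (l[i]'hi) = false :=
    List.not_of_lt_findIdx (xs := l) (p := p) (i := i) (by omega)
  rw [hp] at hfalse
  exact Bool.false_ne_true hfalse.symm

-- binary search computes findIdx on a sorted list
theorem pvBSearch_eq (pre : List Int) (half : Int)
    (mono : ∀ i j : Nat, (hij : i ≤ j) → (hj : j < pre.length) → pre[i]'(Nat.lt_of_le_of_lt hij hj) ≤ pre[j]) :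
    ∀ (fuel lo hi : Nat), hi - lo ≤ fuel →
    lo ≤ pre.findIdx (fun p => half ≤ p) → pre.findIdx (fun p => half ≤ p) ≤ hi →
    hi ≤ pre.length →
    pvBSearch pre half lo hi = pre.findIdx (fun p => half ≤ p) := by
  intro fuel
  induction fuel with
  | zero =>
    intro lo hi hf h1 h2 _
    have : lo = hi := by omega
    subst this
    rw [pvBSearch]; simp; omega
  | succ n ih =>
    intro lo hi hf h1 h2 hlen
    by_cases h : lo < hi
    · rw [pvBSearch]
      simp only [h, dite_true]
      set t := pre.findIdx (fun p => half ≤ p) with ht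
      have hmid : (lo + hi) / 2 < hi ∧ lo ≤ (lo + hi) / 2 := by omega
      have hmlt : (lo + hi) / 2 < pre.length := by omega
      rw [List.getD_eq_getElem pre 0 hmlt]
      by_cases hc : half ≤ pre[(lo + hi) / 2]
      · simp only [hc, if_true]
        have hle : t ≤ (lo + hi) / 2 := pvFindIdx_le hmlt (by simp [hc])
        exact ih lo ((lo + hi) / 2) (by omega) h1 hle (by omega)
      · simp only [hc, if_false]
        -- pre[mid] < half, so every index up to mid fails the predicate
        have hgt : (lo + hi) / 2 < t := by
          by_contra hcon
          have htl : t < pre.length := by omega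
          have hpt : half ≤ pre[t] := by
            have := List.findIdx_getElem (p := fun p => half ≤ p) (xs := pre) (w := htl)
            simpa using this
          have := mono t ((lo + hi) / 2) (by omega) hmlt
          omega
        exact ih ((lo + hi) / 2 + 1) hi (by omega) (by omega) h2 hlen
    · have : lo = hi := by omega
      subst this
      rw [pvBSearch]; simp; omega

-- A's loop computes findIdx on the prefix sums (or the default when nothing fires)
theorem pvALoop_eq (halfway : Int) (ls : List String) : ∀ (s cur si : Int),
    pvALoop halfway (PySem.List.enumerate ls s) cur si =
      (if (pvPsums cur ls).findIdx (fun p => halfway ≤ p) < ls.length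
        then s + ((pvPsums cur ls).findIdx (fun p => halfway ≤ p) : Int) else si) := by
  induction ls with
  | nil => intro s cur si; simp [PySem.List.enumerate_nil, pvALoop, pvPsums]
  | cons l ls ih =>
    intro s cur si
    rw [PySem.List.enumerate_cons]
    show (if halfway ≤ cur + PySem.Str.len l then s
          else pvALoop halfway (PySem.List.enumerate ls (s+1)) (cur + PySem.Str.len l) si) = _
    rw [show pvPsums cur (l :: ls) = (cur + PySem.Str.len l) :: pvPsums (cur + PySem.Str.len l) ls from rfl]
    rw [List.findIdx_cons]
    by_cases hc : halfway ≤ cur + PySem.Str.len l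
    · rw [if_pos hc]
      simp only [hc, decide_true, cond_true]
      rw [if_pos (by simp)]
      simp
    · rw [if_neg hc]
      simp only [hc, decide_false, cond_false]
      rw [ih (s+1) (cur + PySem.Str.len l) si]
      set t := (pvPsums (cur + PySem.Str.len l) ls).findIdx (fun p => halfway ≤ p) with ht
      by_cases h2 : t < ls.length
      · rw [if_pos h2, if_pos (by simp only [List.length_cons]; omega)]
        push_cast; ring
      · rw [if_neg h2, if_neg (by simp only [List.length_cons]; omega)]

-- the predicate fires somewhere: the total is a prefix sum and half = total // 2 ≤ total
theorem pvFires (ls : List String) (h : ls ≠ []) :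
    (pvPsums 0 ls).findIdx (fun p => decide (PySem.Int.floordiv (pvSumL ls) 2 ≤ p)) < ls.length := by
  have hnn := pvSumL_nonneg ls
  have hfd : PySem.Int.floordiv (pvSumL ls) 2 = pvSumL ls / 2 :=
    PySem.Int.floordiv_eq_ediv_of_pos (by omega)
  have hhalf : PySem.Int.floordiv (pvSumL ls) 2 ≤ pvSumL ls := by
    rw [hfd]; omega
  have hmem : (0 : Int) + pvSumL ls ∈ pvPsums 0 ls := pvTotal_mem 0 ls h
  have hlt : (pvPsums 0 ls).findIdx (fun p => decide (PySem.Int.floordiv (pvSumL ls) 2 ≤ p)) <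
      (pvPsums 0 ls).length := by
    rw [List.findIdx_lt_length]
    exact ⟨0 + pvSumL ls, hmem, by simp; omega⟩
  rwa [pvPsums_length] at hlt

-- B's split index equals A's split index, as integers
theorem pvIdx_eq (ls : List String) :
    ((pvBSearch (pvPsums 0 ls) (PySem.Int.floordiv (pvSumL ls) 2) 0 (pvPsums 0 ls).length : Nat) : Int) =
    pvALoop (PySem.Int.floordiv (pvSumL ls) 2) (PySem.List.enumerate ls 0) 0 0 := by
  set half := PySem.Int.floordiv (pvSumL ls) 2 with hh
  rw [pvBSearch_eq (pvPsums 0 ls) half (fun i j hij hj => pvPsums_mono 0 ls hij hj)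
    ((pvPsums 0 ls).length) 0 (pvPsums 0 ls).length (by omega) (by omega)
    List.findIdx_le_length (le_refl _)]
  rw [pvALoop_eq half ls 0 0 0]
  cases hls : ls with
  | nil => subst hls; simp [pvPsums]
  | cons a as =>
    subst hls
    rw [if_pos (pvFires (a :: as) (by simp))]
    simp

theorem split_string_at_midpoint_eq (input_string : String) :
    split_string_at_midpoint input_string = split_string_at_midpoint_alt input_string := by
  simp only [split_string_at_midpoint, split_string_at_midpoint_alt]
  have h1 : (PySem.Str.splitlines input_string).foldl
      (fun acc line => acc + PySem.Str.len line) 0 = pvSumL (PySem.Str.splitlines input_string) := by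
    rw [pvFoldl_sum]; ring
  have h2 : (PySem.Str.splitlines input_string).foldl
      (fun (a : List Int × Int) line =>
        let r' := a.2 + PySem.Str.len line
        (a.1 ++ [r'], r')) ([], 0) =
      (pvPsums 0 (PySem.Str.splitlines input_string), pvSumL (PySem.Str.splitlines input_string)) := by
    have := pvFoldl_pr (PySem.Str.splitlines input_string) [] 0
    simpa using this
  rw [h1, h2]
  rw [← pvIdx_eq (PySem.Str.splitlines input_string)]

-- ===== VERDICT (by name: the statement is the Claim_ definition above) =====
theorem split_string_at_midpoint_spec : Claim_equal_split_string_at_midpoint := by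
  intro input_string _
  unfold Spec_split_string_at_midpoint
  exact split_string_at_midpoint_eq input_string
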